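-- pv_equiv track=rewrite | github.com/AUTOMATIC1111/stable-diffusion-webui | handlers/diffstudio/diffsynth/extensions/FastBlend/api.py | extract_number_from_filename
-- ===== SOURCE A (Python) =====
-- def extract_number_from_filename(file_name):
--     result = []
--     number = -1
--     for i in file_name:
--         if ord(i)>=ord("0") and ord(i)<=ord("9"):
--             if number == -1:
--                 number = 0
--             number = number*10 + ord(i) - ord("0")
--         else:
--             if number != -1:
--                 result.append(number)
--                 number = -1
--     if number != -1:
--         result.append(number)
--     result = tuple(result)
--     return result
-- ===== SOURCE B (Python) =====
-- def extract_number_from_filename(file_name):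
--     # scan for maximal digit runs with an index, convert each run at once
--     result = []
--     i, n = 0, len(file_name)
--     while i < n:
--         if '0' <= file_name[i] <= '9':
--             j = i + 1
--             while j < n and '0' <= file_name[j] <= '9':
--                 j += 1
--             result.append(int(file_name[i:j]))
--             i = j
--         else:
--             i += 1
--     return tuple(result)
-- ===== Notes on version B (the rewrite author's own statement) =====
-- stated objective: alternative
-- what changed: Replaced A's per-character state machine (running accumulator with a -1 sentinel and boundary appends) by an index scan that finds each maximal digit run with an inner pointer and converts the whole run at once via int().
import Mathlib
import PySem

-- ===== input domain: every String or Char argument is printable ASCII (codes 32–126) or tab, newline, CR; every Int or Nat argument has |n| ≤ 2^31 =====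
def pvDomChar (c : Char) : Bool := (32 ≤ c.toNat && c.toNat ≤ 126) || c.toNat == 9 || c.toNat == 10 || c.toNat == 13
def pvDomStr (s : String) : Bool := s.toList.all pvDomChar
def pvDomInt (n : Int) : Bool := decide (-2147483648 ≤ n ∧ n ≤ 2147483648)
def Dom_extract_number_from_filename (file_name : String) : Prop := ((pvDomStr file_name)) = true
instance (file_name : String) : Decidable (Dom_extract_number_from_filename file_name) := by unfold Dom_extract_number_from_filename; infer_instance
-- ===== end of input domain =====

-- B replaces A's accumulator state machine by a maximal-digit-run scan; alternative decomposition, same cost.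

-- ===== PORT A =====
-- one step of A's for-loop over the pair (result, number)
def pvStepA (st : List Int × Int) (c : Char) : List Int × Int :=
  if 48 ≤ c.toNat ∧ c.toNat ≤ 57 then
    let number := if st.2 = -1 then (0 : Int) else st.2
    (st.1, number * 10 + (c.toNat : Int) - 48)
  else
    if st.2 ≠ -1 then (st.1 ++ [st.2], -1) else st

def extract_number_from_filename (file_name : String) : List Int :=
  let st := file_name.toList.foldl pvStepA ([], -1)
  if st.2 ≠ -1 then st.1 ++ [st.2] else st.1

-- ===== PORT B =====
-- digit test '0' <= c <= '9'
def pvDig (c : Char) : Bool := 48 ≤ c.toNat && c.toNat ≤ 57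

-- int() on a run of ASCII digits (exact on digit-only strings, which is all B passes to int)
def pvRunToInt (r : List Char) : Int := r.foldl (fun n c => n * 10 + ((c.toNat : Int) - 48)) 0

-- B's outer while-loop: at a digit, take the maximal run (inner while) and convert it; else advance
def pvRuns : List Char → List Int
  | [] => []
  | c :: cs =>
    if pvDig c then
      pvRunToInt (c :: cs.takeWhile pvDig) :: pvRuns (cs.dropWhile pvDig)
    else
      pvRuns cs
  termination_by l => l.length
  decreasing_by
    · simpa using Nat.lt_succ_of_le (List.length_dropWhile_le _ _)
    · simp

def extract_number_from_filename_alt (file_name : String) : List Int :=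
  pvRuns file_name.toList

-- ===== PRECONDITION & SPEC =====
def Spec_extract_number_from_filename (file_name : String) (out : List Int) : Prop := out = extract_number_from_filename_alt file_name
instance (file_name : String) (out : List Int) : Decidable (Spec_extract_number_from_filename file_name out) := by unfold Spec_extract_number_from_filename; infer_instance

-- ===== CLAIM (what is proved, stated in full; the proofs are below) =====
def Claim_equal_extract_number_from_filename : Prop := ∀ (file_name : String), Dom_extract_number_from_filename file_name → Spec_extract_number_from_filename file_name (extract_number_from_filename file_name)

-- ===== LEMMAS AND PROOFS =====
-- A's final flush of the pending number
def pvFinish (st : List Int × Int) : List Int :=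
  if st.2 ≠ -1 then st.1 ++ [st.2] else st.1

-- accumulate further digits of a run onto a partial value
def pvRunFrom (num : Int) (r : List Char) : Int :=
  r.foldl (fun n c => n * 10 + ((c.toNat : Int) - 48)) num

theorem pvRuns_cons_dig (c : Char) (cs : List Char) (h : pvDig c = true) :
    pvRuns (c :: cs) = pvRunToInt (c :: cs.takeWhile pvDig) :: pvRuns (cs.dropWhile pvDig) := by
  rw [pvRuns]; simp [h]

theorem pvRuns_cons_ndig (c : Char) (cs : List Char) (h : ¬ pvDig c = true) :
    pvRuns (c :: cs) = pvRuns cs := by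
  rw [pvRuns]; simp [h]

-- the joint loop invariant: from a clean state A computes the runs; from a pending number
-- num ≥ 0 A extends num with the leading digit run and then computes the remaining runs
theorem pvInvariant (cs : List Char) :
    (∀ res : List Int, pvFinish (cs.foldl pvStepA (res, -1)) = res ++ pvRuns cs) ∧
    (∀ (res : List Int) (num : Int), 0 ≤ num →
      pvFinish (cs.foldl pvStepA (res, num)) =
        res ++ pvRunFrom num (cs.takeWhile pvDig) :: pvRuns (cs.dropWhile pvDig)) := by
  induction cs with
  | nil =>
    constructor
    · intro res; simp [pvFinish, pvRuns]
    · intro res num h0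
      have : num ≠ -1 := by omega
      simp [pvFinish, pvRuns, pvRunFrom, this]
  | cons c cs ih =>
    have hd : pvDig c = true ↔ (48 ≤ c.toNat ∧ c.toNat ≤ 57) := by
      simp [pvDig]
    constructor
    · intro res
      by_cases h : pvDig c = true
      · have hc := hd.mp h
        have hv : (0 : Int) ≤ 0 * 10 + ((c.toNat : Int) - 48) := by
          have : (48 : Int) ≤ c.toNat := by exact_mod_cast hc.1
          omega
        rw [List.foldl_cons]
        have hstep : pvStepA (res, -1) c = (res, 0 * 10 + ((c.toNat : Int) - 48)) := by
          simp [pvStepA, hc]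
        rw [hstep, ih.2 res _ hv, pvRuns_cons_dig c cs h]
        simp [pvRunToInt, pvRunFrom]
      · have hc : ¬ (48 ≤ c.toNat ∧ c.toNat ≤ 57) := fun hh => h (hd.mpr hh)
        rw [List.foldl_cons]
        have hstep : pvStepA (res, -1) c = (res, -1) := by
          simp [pvStepA, hc]
        rw [hstep, ih.1 res, pvRuns_cons_ndig c cs h]
    · intro res num h0
      have hne : num ≠ -1 := by omega
      by_cases h : pvDig c = true
      · have hc := hd.mp h
        have hv : (0 : Int) ≤ num * 10 + ((c.toNat : Int) - 48) := by
          have : (48 : Int) ≤ c.toNat := by exact_mod_cast hc.1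
          omega
        rw [List.foldl_cons]
        have hstep : pvStepA (res, num) c = (res, num * 10 + ((c.toNat : Int) - 48)) := by
          simp [pvStepA, hc, hne]; ring
        rw [hstep, ih.2 res _ hv]
        simp [h, pvRunFrom, List.foldl_cons]
      · have hc : ¬ (48 ≤ c.toNat ∧ c.toNat ≤ 57) := fun hh => h (hd.mpr hh)
        rw [List.foldl_cons]
        have hstep : pvStepA (res, num) c = (res ++ [num], -1) := by
          simp [pvStepA, hc, hne]
        rw [hstep, ih.1 (res ++ [num])]
        simp [h, pvRuns_cons_ndig c cs h, pvRunFrom]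

-- ===== VERDICT (by name: the statement is the Claim_ definition above) =====
theorem extract_number_from_filename_spec : Claim_equal_extract_number_from_filename := by
  intro s _
  show extract_number_from_filename s = extract_number_from_filename_alt s
  have h := (pvInvariant s.toList).1 []
  simpa [extract_number_from_filename, extract_number_from_filename_alt, pvFinish] using h
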